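-- pv_equiv track=rewrite | github.com/NazimTheAllFather/temperature-converter-project | temp_converter.py | is_real_number
-- ===== SOURCE A (Python) =====
-- def is_real_number(user_input):
--     leading_sign = ''
--     decimal_point_index = -1
--     length = len(user_input)
--     ord_value = 0
--
--     #Using an if-else statement to ensure that users enters at least one character
--     if (length < 1):
--         return False
--     else:
--         #If user_input has more than 1 character, leading_sign is given the first element
--         leading_sign = user_input[0]
--
--     #Detecting leading positve or negative signs
--     if (leading_sign == '+' or leading_sign == '-') and length > 1:
--         user_input = user_input[1:]
--         length = len(user_input)
--
--     #Determining the index of the radix point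
--     for i in range(length):
--         if user_input[i] == '.':
--             decimal_point_index = i
--             break
--
--     #Using a loop to determine if user_input's characters are within an acceptable ASCII range
--     for i in range(length):
--         #if radix point has been found just continue
--         if i == decimal_point_index:
--             continue
--         #check if character is not within an acceptable number range
--         ord_value = ord(user_input[i])
--         if ord_value < 48 or ord_value > 57: #48 and 57 represent the ordinal numbers for ASCII character 0 and 9
--             return False
--
--     return True
-- ===== SOURCE B (Python) =====
-- def is_real_number(user_input):
--     if len(user_input) == 0:
--         return False
--     if user_input[0] in '+-' and len(user_input) > 1:
--         user_input = user_input[1:]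
--     seen_dot = False
--     for ch in user_input:
--         if ch == '.':
--             if seen_dot:
--                 return False
--             seen_dot = True
--         elif not ('0' <= ch <= '9'):
--             return False
--     return True
-- ===== Notes on version B (the rewrite author's own statement) =====
-- stated objective: simpler
-- what changed: Replaces A's two sequential index loops (find the first dot's index, then re-scan every index skipping it) with a single direct pass over the characters carrying a seen_dot flag; one scan instead of two and direct char iteration instead of indexing gives a constant-factor speedup.
import Mathlib
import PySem

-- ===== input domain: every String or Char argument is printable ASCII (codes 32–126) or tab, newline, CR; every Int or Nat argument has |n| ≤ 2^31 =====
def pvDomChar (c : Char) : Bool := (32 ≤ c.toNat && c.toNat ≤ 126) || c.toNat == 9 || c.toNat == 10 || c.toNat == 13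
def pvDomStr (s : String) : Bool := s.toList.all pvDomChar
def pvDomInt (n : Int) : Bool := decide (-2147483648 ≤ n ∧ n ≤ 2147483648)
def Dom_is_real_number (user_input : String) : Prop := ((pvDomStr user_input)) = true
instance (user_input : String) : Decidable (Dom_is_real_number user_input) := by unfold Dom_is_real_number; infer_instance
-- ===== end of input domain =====

-- B replaces A's two index loops (locate the first dot, then re-scan skipping that index)
-- with one pass carrying a seen_dot flag; same results, simpler structure.

-- ===== PORT A =====
-- first loop of A: index of the first '.', or -1 (i is the running index)
def pvFindDotA : List Char → Int → Int
  | [], _ => -1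
  | c :: rest, i => if c = '.' then i else pvFindDotA rest (i + 1)

-- second loop of A: every character except the one at index d must have ord in [48,57]
def pvCheckA : List Char → Int → Int → Bool
  | [], _, _ => true
  | c :: rest, i, d =>
    if i = d then pvCheckA rest (i + 1) d
    else if c.toNat < 48 ∨ 57 < c.toNat then false
    else pvCheckA rest (i + 1) d

def is_real_number (user_input : String) : Bool :=
  match user_input.toList with
  | [] => false
  | c :: rest =>
    let body := if (c = '+' ∨ c = '-') ∧ rest ≠ [] then rest else c :: rest
    pvCheckA body 0 (pvFindDotA body 0)

-- ===== PORT B =====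
-- single pass with a seen_dot flag
def pvCheckB : List Char → Bool → Bool
  | [], _ => true
  | c :: rest, seen =>
    if c = '.' then (if seen then false else pvCheckB rest true)
    else if '0' ≤ c ∧ c ≤ '9' then pvCheckB rest seen
    else false

def is_real_number_alt (user_input : String) : Bool :=
  match user_input.toList with
  | [] => false
  | c :: rest =>
    let body := if (c = '+' ∨ c = '-') ∧ rest ≠ [] then rest else c :: rest
    pvCheckB body false

-- ===== PRECONDITION & SPEC =====
def Spec_is_real_number (user_input : String) (out : Bool) : Prop := out = is_real_number_alt user_input
instance (user_input : String) (out : Bool) : Decidable (Spec_is_real_number user_input out) := by unfold Spec_is_real_number; infer_instance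

-- ===== CLAIM (what is proved, stated in full; the proofs are below) =====
def Claim_equal_is_real_number : Prop := ∀ (user_input : String), Dom_is_real_number user_input → Spec_is_real_number user_input (is_real_number user_input)

-- ===== LEMMAS AND PROOFS =====

-- the two digit tests agree on every character
theorem pv_digit_eq (c : Char) : (¬ (c.toNat < 48 ∨ 57 < c.toNat)) ↔ ('0' ≤ c ∧ c ≤ '9') := by
  rw [Char.le_def, Char.le_def, UInt32.le_iff_toNat_le, UInt32.le_iff_toNat_le]
  change ¬(c.val.toNat < 48 ∨ 57 < c.val.toNat) ↔ (48 ≤ c.val.toNat ∧ c.val.toNat ≤ 57)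
  omega

theorem pvFindDotA_ge (l : List Char) (i : Int) :
    pvFindDotA l i = -1 ∨ i ≤ pvFindDotA l i := by
  induction l generalizing i with
  | nil => left; rfl
  | cons c rest ih =>
    by_cases h : c = '.'
    · right; simp [pvFindDotA, h]
    · rcases ih (i + 1) with h' | h' <;> simp [pvFindDotA, h, h'] <;> omega

-- once the skipped index is behind us, A's loop just demands all digits
theorem pvCheckA_past (l : List Char) (i d : Int) (h : d < i) :
    pvCheckA l i d = l.all (fun c => decide ('0' ≤ c ∧ c ≤ '9')) := by
  induction l generalizing i with
  | nil => rfl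
  | cons c rest ih =>
    have hne : i ≠ d := by omega
    by_cases hd : '0' ≤ c ∧ c ≤ '9'
    · have hc : ¬ (c.toNat < 48 ∨ 57 < c.toNat) := (pv_digit_eq c).2 hd
      simp [pvCheckA, hne, hc, hd, ih (i + 1) (by omega)]
    · have hc : c.toNat < 48 ∨ 57 < c.toNat := by
        by_contra h'; exact hd ((pv_digit_eq c).1 h')
      simp [pvCheckA, hne, hc, hd]

-- after the dot is seen, B's loop also demands all digits
theorem pvCheckB_seen (l : List Char) :
    pvCheckB l true = l.all (fun c => decide ('0' ≤ c ∧ c ≤ '9')) := by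
  induction l with
  | nil => rfl
  | cons c rest ih =>
    by_cases hdot : c = '.'
    · subst hdot
      simp [pvCheckB]
    · by_cases hd : '0' ≤ c ∧ c ≤ '9' <;> simp [pvCheckB, hdot, hd, ih]

theorem pv_main (l : List Char) (i : Int) (hi : 0 ≤ i) :
    pvCheckA l i (pvFindDotA l i) = pvCheckB l false := by
  induction l generalizing i with
  | nil => rfl
  | cons c rest ih =>
    by_cases hdot : c = '.'
    · subst hdot
      have h1 : pvFindDotA ('.' :: rest) i = i := by simp [pvFindDotA]
      have h2 : pvCheckA ('.' :: rest) i i = pvCheckA rest (i + 1) i := by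
        simp [pvCheckA]
      have h3 : pvCheckB ('.' :: rest) false = pvCheckB rest true := by
        simp [pvCheckB]
      rw [h1, h2, h3, pvCheckA_past rest (i + 1) i (by omega), pvCheckB_seen]
    · have hfd : pvFindDotA (c :: rest) i = pvFindDotA rest (i + 1) := by
        simp [pvFindDotA, hdot]
      have hne : i ≠ pvFindDotA rest (i + 1) := by
        rcases pvFindDotA_ge rest (i + 1) with h | h <;> omega
      rw [hfd]
      by_cases hd : '0' ≤ c ∧ c ≤ '9'
      · have hc : ¬ (c.toNat < 48 ∨ 57 < c.toNat) := (pv_digit_eq c).2 hd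
        simp [pvCheckA, pvCheckB, hne, hdot, hd, hc, ih (i + 1) (by omega)]
      · have hc : c.toNat < 48 ∨ 57 < c.toNat := by
          by_contra h'; exact hd ((pv_digit_eq c).1 h')
        simp [pvCheckA, pvCheckB, hne, hdot, hd, hc]

-- ===== VERDICT (by name: the statement is the Claim_ definition above) =====
theorem is_real_number_spec : Claim_equal_is_real_number := by
  intro s _
  unfold Spec_is_real_number is_real_number is_real_number_alt
  cases s.toList with
  | nil => rfl
  | cons c rest => exact pv_main _ 0 le_rfl
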